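-- pv_equiv track=rewrite | github.com/Housebigger/ros2_gazebo_tugbot_navigate | ros2_ws_tugbot_20260419/tests/test_temporal_debug.py | make_test_image
-- ===== SOURCE A (Python) =====
-- def make_test_image(width: int, height: int, blue_column: int | None):
--     image = []
--     for row_index in range(height):
--         row = []
--         for column_index in range(width):
--             if blue_column is not None and row_index >= height // 2 and column_index == blue_column:
--                 row.append([10, 10, 220])
--             else:
--                 row.append([30, 30, 30])
--         image.append(row)
--     return image
-- ===== SOURCE B (Python) =====
-- def make_test_image(width: int, height: int, blue_column: int | None):
--     # Fill-then-patch: build an all-gray image, then overwrite the lower half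
--     # of the blue column in a second pass (guarded against out-of-range columns).
--     image = [[[30, 30, 30] for _ in range(width)] for _ in range(height)]
--     if blue_column is not None and 0 <= blue_column < width:
--         for row in range(height // 2, height):
--             image[row][blue_column] = [10, 10, 220]
--     return image
-- ===== Notes on version B (the rewrite author's own statement) =====
-- stated objective: simpler
-- what changed: Replaced the per-cell branch inside nested append loops by a two-pass fill-then-patch: build the all-gray image with a comprehension, then overwrite the lower half of the blue column in place.
import Mathlib
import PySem

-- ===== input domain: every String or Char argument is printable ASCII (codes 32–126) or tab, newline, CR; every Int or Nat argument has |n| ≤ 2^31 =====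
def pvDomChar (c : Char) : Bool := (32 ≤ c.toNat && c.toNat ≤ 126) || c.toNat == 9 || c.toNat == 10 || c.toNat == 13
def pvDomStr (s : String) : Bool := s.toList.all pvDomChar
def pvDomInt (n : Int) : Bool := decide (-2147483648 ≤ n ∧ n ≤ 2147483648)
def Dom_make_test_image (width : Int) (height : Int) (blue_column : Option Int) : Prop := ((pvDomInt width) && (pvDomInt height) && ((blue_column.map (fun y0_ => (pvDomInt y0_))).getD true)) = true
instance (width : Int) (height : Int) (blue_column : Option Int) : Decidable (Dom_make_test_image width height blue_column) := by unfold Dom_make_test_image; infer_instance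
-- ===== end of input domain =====

-- B builds the all-gray image first and then patches the lower half of the blue
-- column in a second pass (fill-then-patch), instead of A's per-cell branch.


-- ===== PORT A =====
def make_test_image (width : Int) (height : Int) (blue_column : Option Int) : List (List (List Int)) :=
  (PySem.List.pyRange 0 height 1).foldl (fun image row_index =>
    image ++ [(PySem.List.pyRange 0 width 1).foldl (fun row column_index =>
      row ++ [if blue_column.isSome ∧ row_index ≥ PySem.Int.floordiv height 2 ∧ some column_index = blue_column then
                ([10, 10, 220] : List Int)
              else [30, 30, 30]]) []]) []

-- ===== PORT B =====
def make_test_image_alt (width : Int) (height : Int) (blue_column : Option Int) : List (List (List Int)) :=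
  let image := (PySem.List.pyRange 0 height 1).map (fun _ =>
    (PySem.List.pyRange 0 width 1).map (fun _ => ([30, 30, 30] : List Int)))
  match blue_column with
  | some b =>
    if 0 ≤ b ∧ b < width then
      (PySem.List.pyRange (PySem.Int.floordiv height 2) height 1).foldl
        (fun img row =>
          PySem.List.pySetD img row
            (PySem.List.pySetD (PySem.List.pyGetD img row []) b [10, 10, 220])) image
    else image
  | none => image

-- ===== PRECONDITION & SPEC =====
def Spec_make_test_image (width : Int) (height : Int) (blue_column : Option Int) (out : List (List (List Int))) : Prop := out = make_test_image_alt width height blue_column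
instance (width : Int) (height : Int) (blue_column : Option Int) (out : List (List (List Int))) : Decidable (Spec_make_test_image width height blue_column out) := by unfold Spec_make_test_image; infer_instance

-- ===== CLAIM (what is proved, stated in full; the proofs are below) =====
def Claim_equal_make_test_image : Prop := ∀ (width : Int) (height : Int) (blue_column : Option Int), Dom_make_test_image width height blue_column → Spec_make_test_image width height blue_column (make_test_image width height blue_column)

-- ===== LEMMAS AND PROOFS =====

-- Result of B's patch loop, one cell of getElem? at a time.
theorem foldl_patch_getElem? {α : Type} (f : α → α) (d : α) (b : Int) :
    ∀ (a : Int) (img : List α) (k : Nat), 0 ≤ a →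
      ((PySem.List.pyRange a b 1).foldl
          (fun im r => PySem.List.pySetD im r (f (PySem.List.pyGetD im r d))) img)[k]? =
        if a ≤ (k : Int) ∧ (k : Int) < b then (img[k]?).map f else img[k]? := by
  suffices H : ∀ (n : Nat) (a : Int) (img : List α), 0 ≤ a → (b - a).toNat = n →
      ∀ k : Nat, ((PySem.List.pyRange a b 1).foldl
          (fun im r => PySem.List.pySetD im r (f (PySem.List.pyGetD im r d))) img)[k]? =
        if a ≤ (k : Int) ∧ (k : Int) < b then (img[k]?).map f else img[k]? by
    intro a img k ha
    exact H (b - a).toNat a img ha rfl k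
  intro n
  induction n with
  | zero =>
    intro a img ha hn k
    rw [PySem.List.pyRange_one_eq_nil (by omega), List.foldl_nil, if_neg (by omega)]
  | succ n ih =>
    intro a img ha hn k
    have hab : a < b := by omega
    rw [PySem.List.pyRange_one_cons hab, List.foldl_cons,
        ih (a + 1) _ (by omega) (by omega) k,
        PySem.List.pySetD_of_nonneg img _ ha, List.getElem?_set]
    by_cases hk : a.toNat = k
    · subst hk
      rw [if_neg (by omega), if_pos rfl]
      by_cases hl : a.toNat < img.length
      · rw [if_pos hl, if_pos ⟨by omega, by omega⟩,
            PySem.List.pyGetD_eq_getElem img d ha (by omega),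
            List.getElem?_eq_getElem hl, Option.map_some]
      · rw [if_neg hl, if_pos ⟨by omega, by omega⟩, List.getElem?_eq_none (by omega),
            Option.map_none]
    · rw [if_neg hk]
      by_cases hkb : a ≤ (k : Int) ∧ (k : Int) < b
      · rw [if_pos (by omega), if_pos hkb]
      · rw [if_neg (by omega), if_neg hkb]

-- A's nested appends are the nested maps.
theorem make_test_image_eq_map (width height : Int) (blue_column : Option Int) :
    make_test_image width height blue_column =
      (PySem.List.pyRange 0 height 1).map (fun r =>
        (PySem.List.pyRange 0 width 1).map (fun c =>
          if blue_column.isSome ∧ r ≥ PySem.Int.floordiv height 2 ∧ some c = blue_column then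
            ([10, 10, 220] : List Int)
          else [30, 30, 30])) := by
  unfold make_test_image
  rw [PySem.List.foldl_append_singleton_eq_map]
  refine List.map_congr_left fun r _ => ?_
  rw [PySem.List.foldl_append_singleton_eq_map]
  simp

-- Setting one cell of a row built as a map over a range is the same map with an if.
theorem set_map_pyRange {α : Type} (w bb : Int) (hb : 0 ≤ bb) (hbw : bb < w)
    (g : Int → α) (v : α) :
    ((PySem.List.pyRange 0 w 1).map g).set bb.toNat v =
      (PySem.List.pyRange 0 w 1).map (fun c => if c = bb then v else g c) := by
  apply List.ext_getElem?
  intro k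
  rw [List.getElem?_set]
  simp only [List.getElem?_map, PySem.List.getElem?_pyRange_one, List.length_map,
    PySem.List.length_pyRange_one]
  by_cases hk : bb.toNat = k
  · rw [if_pos hk, if_pos (by omega), if_pos (by omega), Option.map_some, if_pos (by omega)]
  · rw [if_neg hk]
    by_cases hkw : k < (w - 0).toNat
    · rw [if_pos hkw, Option.map_some, Option.map_some, if_neg (by omega)]
    · rw [if_neg hkw]
      rfl

-- ===== VERDICT (by name: the statement is the Claim_ definition above) =====
theorem make_test_image_spec : Claim_equal_make_test_image := by
  intro width height blue_column _
  unfold Spec_make_test_image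
  rw [make_test_image_eq_map]
  unfold make_test_image_alt
  cases blue_column with
  | none => simp
  | some b =>
    simp only [Option.isSome_some, true_and, Option.some.injEq]
    by_cases hb : 0 ≤ b ∧ b < width
    · rw [if_pos hb]
      by_cases hh : 0 < height
      · have ha : 0 ≤ PySem.Int.floordiv height 2 := by
          rw [PySem.Int.floordiv_eq_ediv_of_pos (by omega)]; omega
        apply List.ext_getElem?
        intro k
        rw [foldl_patch_getElem? (fun row => PySem.List.pySetD row b [10, 10, 220]) [] height
            (PySem.Int.floordiv height 2) _ k ha]
        simp only [List.getElem?_map, PySem.List.getElem?_pyRange_one]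
        by_cases hkh : k < (height - 0).toNat
        · rw [if_pos hkh]
          simp only [Option.map_some]
          by_cases hmid : PySem.Int.floordiv height 2 ≤ (k : Int)
          · rw [if_pos ⟨by omega, by omega⟩]
            congr 1
            rw [PySem.List.pySetD_of_nonneg _ _ hb.1,
                set_map_pyRange width b hb.1 hb.2 (fun _ => ([30, 30, 30] : List Int)) [10, 10, 220]]
            refine List.map_congr_left fun c hc => ?_
            rw [PySem.List.mem_pyRange_one] at hc
            simp only [ge_iff_le]
            by_cases hcb : c = b
            · rw [if_pos hcb, if_pos ⟨by omega, hcb⟩]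
            · rw [if_neg hcb, if_neg (by tauto)]
          · rw [if_neg (by omega)]
            congr 1
            refine List.map_congr_left fun c _ => ?_
            rw [if_neg (by omega)]
        · rw [if_neg hkh]
          simp
      · have h1 : PySem.List.pyRange 0 height 1 = [] := PySem.List.pyRange_one_eq_nil (by omega)
        have h2 : PySem.List.pyRange (PySem.Int.floordiv height 2) height 1 = [] := by
          apply PySem.List.pyRange_one_eq_nil
          rw [PySem.Int.floordiv_eq_ediv_of_pos (by omega)]
          omega
        rw [h1, h2]
        simp
    · rw [if_neg hb]
      refine List.map_congr_left fun r _ => ?_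
      refine List.map_congr_left fun c hc => ?_
      rw [PySem.List.mem_pyRange_one] at hc
      rw [if_neg (by omega)]
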